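-- pv_equiv track=rewrite | github.com/miliar/Code_Jam_Webscraper | solutions_python/solutions_year08_round0_nr2/287.py | train_count
-- ===== SOURCE A (Python) =====
-- def train_count(horarios_llegada, horarios_partida, T):
-- 	ahorrados=0
-- 	horarios_partida.sort()
--
-- 	for i in horarios_llegada:
-- 		for j in horarios_partida:
-- 			#print "caso",i,j
-- 			if( i+T <= j ):
-- 				#print "como "+str(i)+' + '+str(T)+' <= '+str(j)+', voy a tomar ese horario con el tren que viene'
-- 				horarios_partida.remove(j)
-- 				#print horarios_partida
-- 				ahorrados+=1
-- 				break
--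
-- 	return ahorrados
-- ===== SOURCE B (Python) =====
-- def train_count(horarios_llegada, horarios_partida, T):
--     deps = sorted(horarios_partida)
--     count = 0
--     for a in horarios_llegada:
--         x = a + T
--         lo, hi = 0, len(deps)
--         while lo < hi:
--             mid = (lo + hi) // 2
--             if deps[mid] < x:
--                 lo = mid + 1
--             else:
--                 hi = mid
--         if lo < len(deps):
--             deps.pop(lo)
--             count += 1
--     return count
-- ===== Notes on version B (the rewrite author's own statement) =====
-- stated objective: faster
-- what changed: Replaces A's inner linear scan over the remaining departures (restarted for every arrival, plus a remove-by-value rescan) with a hand-written binary search that locates the first departure >= arrival+T directly, followed by a pop at that index; B also leaves the argument list unmutated (A sorts it in place).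
import Mathlib
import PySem

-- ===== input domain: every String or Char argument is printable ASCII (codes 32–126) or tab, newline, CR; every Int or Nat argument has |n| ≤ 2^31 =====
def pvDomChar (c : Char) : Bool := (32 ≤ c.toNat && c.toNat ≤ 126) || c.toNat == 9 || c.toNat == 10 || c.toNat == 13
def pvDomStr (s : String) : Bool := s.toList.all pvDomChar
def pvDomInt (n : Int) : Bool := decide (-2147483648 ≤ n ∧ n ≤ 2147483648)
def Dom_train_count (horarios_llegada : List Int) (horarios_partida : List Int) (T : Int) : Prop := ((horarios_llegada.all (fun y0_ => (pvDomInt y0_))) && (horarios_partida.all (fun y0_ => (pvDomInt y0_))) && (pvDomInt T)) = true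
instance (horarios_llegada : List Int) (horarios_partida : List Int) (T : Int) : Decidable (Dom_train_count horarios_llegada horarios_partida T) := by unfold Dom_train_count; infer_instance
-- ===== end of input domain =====

-- B replaces A's per-arrival linear scan (and remove-by-value rescan) over the sorted departure
-- list by a binary search for the first departure ≥ arrival+T plus a pop at that index (objective:
-- faster). Note: A sorts `horarios_partida` in place; B does not mutate it — the equivalence proved
-- here is about the return value only.


-- ===== PORT A =====
-- inner loop `for j in horarios_partida: if i+T <= j: horarios_partida.remove(j); break`.
-- `full` is the list being iterated (and mutated-then-left via break); the scan position is the
-- second argument.  `remove?` can only return `some` here since `j` is drawn from `full`, so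
-- `getD full` is exact (Python's ValueError is unreachable).
def pvAInner (x : Int) (full : List Int) : List Int → List Int × Int
  | [] => (full, 0)
  | j :: rest =>
    if x ≤ j then ((PySem.List.remove? full j).getD full, 1)
    else pvAInner x full rest

def train_count (horarios_llegada : List Int) (horarios_partida : List Int) (T : Int) : Int :=
  let sortedDeps := PySem.List.sorted horarios_partida (fun x => x) false
  (horarios_llegada.foldl
    (fun (st : List Int × Int) i =>
      let r := pvAInner (i + T) st.1 st.1
      (r.1, st.2 + r.2))
    (sortedDeps, 0)).2

-- ===== PORT B =====
-- hand-written bisect_left from Source B (deps[mid] is always in range during the search, so getD is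
-- exact; (lo+hi)//2 on naturals is Nat division).  The fuel argument (hi - lo at the call) is only
-- a totality guard for the while loop: it never runs out while lo < hi.
def pvBisectGo (deps : List Int) (x : Int) : Nat → Nat → Nat → Nat
  | 0, lo, _ => lo
  | f + 1, lo, hi =>
    if lo < hi then
      let mid := (lo + hi) / 2
      if deps.getD mid 0 < x then pvBisectGo deps x f (mid + 1) hi
      else pvBisectGo deps x f lo mid
    else lo

def pvBisect (deps : List Int) (x : Int) (lo hi : Nat) : Nat :=
  pvBisectGo deps x (hi - lo) lo hi

def train_count_alt (horarios_llegada : List Int) (horarios_partida : List Int) (T : Int) : Int :=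
  let deps0 := PySem.List.sorted horarios_partida (fun x => x) false
  (horarios_llegada.foldl
    (fun (st : List Int × Int) a =>
      let lo := pvBisect st.1 (a + T) 0 st.1.length
      if lo < st.1.length then (st.1.eraseIdx lo, st.2 + 1) else st)
    (deps0, 0)).2

-- ===== PRECONDITION & SPEC =====
def Spec_train_count (horarios_llegada : List Int) (horarios_partida : List Int) (T : Int) (out : Int) : Prop := out = train_count_alt horarios_llegada horarios_partida T
instance (horarios_llegada : List Int) (horarios_partida : List Int) (T : Int) (out : Int) : Decidable (Spec_train_count horarios_llegada horarios_partida T out) := by unfold Spec_train_count; infer_instance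

-- ===== CLAIM (what is proved, stated in full; the proofs are below) =====
def Claim_equal_train_count : Prop := ∀ (horarios_llegada : List Int) (horarios_partida : List Int) (T : Int), Dom_train_count horarios_llegada horarios_partida T → Spec_train_count horarios_llegada horarios_partida T (train_count horarios_llegada horarios_partida T)

-- ===== LEMMAS AND PROOFS =====

-- index of the first element ≥ x (list length if none): the common characterisation of A's scan
-- position and B's binary-search result on a sorted list.
def pvIdxGe (x : Int) : List Int → Nat
  | [] => 0
  | j :: rest => if x ≤ j then 0 else pvIdxGe x rest + 1

theorem pvIdxGe_le_length (x : Int) (l : List Int) : pvIdxGe x l ≤ l.length := by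
  induction l with
  | nil => simp [pvIdxGe]
  | cons j rest ih => simp only [pvIdxGe, List.length_cons]; split <;> omega

theorem pvIdxGe_lt (x : Int) (l : List Int) (i : Nat) (hi : i < pvIdxGe x l) :
    l.getD i 0 < x := by
  induction l generalizing i with
  | nil => simp [pvIdxGe] at hi
  | cons j rest ih =>
    simp only [pvIdxGe] at hi
    split at hi
    · omega
    · cases i with
      | zero => simpa using by omega
      | succ k => exact ih k (by omega)

theorem pvIdxGe_ge (x : Int) (l : List Int) (h : pvIdxGe x l < l.length) :
    x ≤ l.getD (pvIdxGe x l) 0 := by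
  induction l with
  | nil => simp at h
  | cons j rest ih =>
    by_cases hx : x ≤ j
    · simp [pvIdxGe, hx]
    · simp only [pvIdxGe, if_neg hx, List.getD_cons_succ, List.length_cons] at h ⊢
      exact ih (by omega)

-- A's inner loop finds the first j with x ≤ j
theorem pvAInner_eq (x : Int) (full l : List Int) :
    pvAInner x full l =
      match l.find? (fun j => decide (x ≤ j)) with
      | none => (full, 0)
      | some j => ((PySem.List.remove? full j).getD full, 1) := by
  induction l with
  | nil => simp [pvAInner]
  | cons j rest ih =>
    simp only [pvAInner, List.find?_cons]
    by_cases hx : x ≤ j <;> simp [hx, ih]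

theorem find?_eq_idxGe (x : Int) (l : List Int) :
    l.find? (fun j => decide (x ≤ j)) =
      if pvIdxGe x l < l.length then some (l.getD (pvIdxGe x l) 0) else none := by
  induction l with
  | nil => simp
  | cons j rest ih =>
    simp only [List.find?_cons, pvIdxGe]
    by_cases hx : x ≤ j
    · simp [hx]
    · simp only [hx]
      rw [ih]
      by_cases hlt : pvIdxGe x rest < rest.length <;> simp [hlt]

-- on a sorted list, removing the value at the first-≥ index is erasing that index
theorem erase_eq_eraseIdx_of_first (l : List Int) (k : Nat) (hk : k < l.length)
    (hne : ∀ i : Nat, i < k → l.getD i 0 ≠ l.getD k 0) :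
    l.erase (l.getD k 0) = l.eraseIdx k := by
  induction l generalizing k with
  | nil => simp at hk
  | cons j rest ih =>
    cases k with
    | zero => simp
    | succ m =>
      have hj : j ≠ (j :: rest).getD (m + 1) 0 := hne 0 (by omega)
      simp only [List.getD_cons_succ] at hj ⊢
      rw [List.erase_cons_tail (by simpa [List.getD] using fun h => hj h),
        List.eraseIdx_cons_succ]
      rw [ih m (by simpa using Nat.lt_of_succ_lt_succ hk)
        (fun i hi => by simpa using hne (i + 1) (by omega))]

theorem pvAInner_sorted (x : Int) (l : List Int) (_hs : l.Pairwise (· ≤ ·)) :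
    pvAInner x l l =
      if pvIdxGe x l < l.length then (l.eraseIdx (pvIdxGe x l), 1) else (l, 0) := by
  rw [pvAInner_eq, find?_eq_idxGe]
  by_cases h : pvIdxGe x l < l.length
  · rw [if_pos h, if_pos h]
    have hmem : l.getD (pvIdxGe x l) 0 ∈ l := by
      have := List.getD_eq_getElem l 0 h
      rw [this]; exact List.getElem_mem h
    show ((PySem.List.remove? l (l.getD (pvIdxGe x l) 0)).getD l, 1) = (l.eraseIdx (pvIdxGe x l), 1)
    rw [PySem.List.remove?_eq_some_erase _ _ hmem]
    simp only [Option.getD_some]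
    rw [erase_eq_eraseIdx_of_first l (pvIdxGe x l) h]
    intro i hi
    have h1 : l.getD i 0 < x := pvIdxGe_lt x l i hi
    have h2 : x ≤ l.getD (pvIdxGe x l) 0 := pvIdxGe_ge x l h
    omega
  · simp [h]

-- sortedness gives monotone getD (needed for the binary-search invariant)
theorem sorted_getD_mono (l : List Int) (hs : l.Pairwise (· ≤ ·)) (i j : Nat)
    (hij : i ≤ j) (hj : j < l.length) : l.getD i 0 ≤ l.getD j 0 := by
  rcases Nat.eq_or_lt_of_le hij with rfl | hlt
  · exact le_refl _
  · rw [List.getD_eq_getElem l 0 (by omega), List.getD_eq_getElem l 0 hj]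
    exact List.pairwise_iff_getElem.mp hs i j (by omega) hj hlt

-- the first-index-≥ characterisation is unique
theorem pvIdxGe_unique (deps : List Int) (x : Int) (lo : Nat) (hlen : lo ≤ deps.length)
    (hlow : ∀ i : Nat, i < lo → deps.getD i 0 < x)
    (hhigh : ∀ i : Nat, lo ≤ i → i < deps.length → x ≤ deps.getD i 0) :
    lo = pvIdxGe x deps := by
  have h1 : pvIdxGe x deps ≤ deps.length := pvIdxGe_le_length x deps
  by_contra hne
  rcases Nat.lt_or_ge lo (pvIdxGe x deps) with h | h
  · exact absurd (pvIdxGe_lt x deps lo h) (not_lt.mpr (hhigh lo le_rfl (by omega)))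
  · have hlt2 : pvIdxGe x deps < lo := by omega
    exact absurd (pvIdxGe_ge x deps (by omega)) (not_le.mpr (hlow _ hlt2))

-- binary search computes pvIdxGe on a sorted list
theorem pvBisectGo_eq (deps : List Int) (x : Int) (hs : deps.Pairwise (· ≤ ·)) :
    ∀ (f lo hi : Nat), hi ≤ deps.length → lo ≤ hi → hi - lo ≤ f →
    (∀ i : Nat, i < lo → deps.getD i 0 < x) →
    (∀ i : Nat, hi ≤ i → i < deps.length → x ≤ deps.getD i 0) →
    pvBisectGo deps x f lo hi = pvIdxGe x deps := by
  intro f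
  induction f with
  | zero =>
    intro lo hi hhi hlohi hfuel hlow hhigh
    have : lo = hi := by omega
    subst this
    exact pvIdxGe_unique deps x lo hhi hlow hhigh
  | succ f ih =>
    intro lo hi hhi hlohi hfuel hlow hhigh
    rw [pvBisectGo]
    by_cases hlt : lo < hi
    · rw [if_pos hlt]
      by_cases hmid : deps.getD ((lo + hi) / 2) 0 < x
      · rw [if_pos hmid]
        exact ih ((lo + hi) / 2 + 1) hi hhi (by omega) (by omega)
          (fun i hi' => lt_of_le_of_lt
            (sorted_getD_mono deps hs i ((lo + hi) / 2) (by omega) (by omega)) hmid) hhigh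
      · rw [if_neg hmid]
        exact ih lo ((lo + hi) / 2) (by omega) (by omega) (by omega) hlow
          (fun i hi' hi'' => le_trans (not_lt.mp hmid)
            (sorted_getD_mono deps hs ((lo + hi) / 2) i (by omega) hi''))
    · rw [if_neg hlt]
      have : lo = hi := by omega
      subst this
      exact pvIdxGe_unique deps x lo hhi hlow hhigh

theorem pvBisect_eq (deps : List Int) (x : Int) (hs : deps.Pairwise (· ≤ ·)) :
    ∀ lo hi : Nat, hi ≤ deps.length → lo ≤ hi →
    (∀ i : Nat, i < lo → deps.getD i 0 < x) →
    (∀ i : Nat, hi ≤ i → i < deps.length → x ≤ deps.getD i 0) →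
    pvBisect deps x lo hi = pvIdxGe x deps := by
  intro lo hi hhi hlohi hlow hhigh
  exact pvBisectGo_eq deps x hs (hi - lo) lo hi hhi hlohi le_rfl hlow hhigh

-- the two per-arrival step functions agree on a sorted state, and both preserve sortedness
theorem step_eq (st : List Int × Int) (v : Int) (hs : st.1.Pairwise (· ≤ ·)) :
    (let r := pvAInner v st.1 st.1; (r.1, st.2 + r.2)) =
      (let lo := pvBisect st.1 v 0 st.1.length;
       if lo < st.1.length then (st.1.eraseIdx lo, st.2 + 1) else st) := by
  have hb : pvBisect st.1 v 0 st.1.length = pvIdxGe v st.1 :=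
    pvBisect_eq st.1 v hs 0 st.1.length le_rfl (Nat.zero_le _)
      (fun i hi => by omega) (fun i hi hi' => by omega)
  rw [pvAInner_sorted v st.1 hs]
  simp only [hb]
  by_cases h : pvIdxGe v st.1 < st.1.length <;> simp [h]

theorem eraseIdx_pairwise (l : List Int) (k : Nat) (hs : l.Pairwise (· ≤ ·)) :
    (l.eraseIdx k).Pairwise (· ≤ ·) :=
  hs.sublist (List.eraseIdx_sublist l k)

theorem foldl_eq (hl : List Int) (T : Int) :
    ∀ (st : List Int × Int), st.1.Pairwise (· ≤ ·) →
    hl.foldl (fun (st : List Int × Int) i =>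
        let r := pvAInner (i + T) st.1 st.1
        (r.1, st.2 + r.2)) st =
      hl.foldl (fun (st : List Int × Int) a =>
        let lo := pvBisect st.1 (a + T) 0 st.1.length
        if lo < st.1.length then (st.1.eraseIdx lo, st.2 + 1) else st) st := by
  induction hl with
  | nil => intro st _; rfl
  | cons a rest ih =>
    intro st hs
    simp only [List.foldl_cons]
    rw [step_eq st (a + T) hs]
    apply ih
    by_cases h : pvBisect st.1 (a + T) 0 st.1.length < st.1.length
    · simp only [if_pos h]
      exact eraseIdx_pairwise _ _ hs
    · simpa [h] using hs

-- ===== VERDICT (by name: the statement is the Claim_ definition above) =====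
theorem train_count_spec : Claim_equal_train_count := by
  intro hl hp T _
  unfold Spec_train_count train_count train_count_alt
  apply congrArg Prod.snd
  apply foldl_eq
  simpa using PySem.List.sorted_pairwise hp (fun x => x) (κ := Int)
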